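-- pv_equiv track=rewrite | github.com/MingkuanY/telepathy | cereal.py | morse_like_encoding
-- ===== SOURCE A (Python) =====
-- def morse_like_encoding(indices, dash_threshold=4400, new_char_threshold=8900*2):
--     morse_code = []
--     current_char = []
--
--     for i in range(len(indices) - 1):
--         # Get the difference between current and next index
--         diff = indices[i + 1] - indices[i]
--
--         # Check if the difference falls within the dash threshold
--         if diff <= dash_threshold:
--             if not current_char or current_char[-1] != '-':
--                 current_char.append('-')  # Add a dash if previous symbol was not a dash
--                 i+=1
--         else:
--             if not current_char or current_char[-1] != '.':
--                 current_char.append('.')  # Add a dot if previous symbol was not a dot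
--
--         # Check if the difference exceeds the new character threshold
--         if diff > new_char_threshold:
--             morse_code.append(''.join(current_char))  # Append current character to morse code
--             current_char = []  # Start a new character
--
--     # Append the final character to the morse code if there's anything left
--     if current_char:
--         morse_code.append(''.join(current_char))
--
--     return morse_code
-- ===== SOURCE B (Python) =====
-- def _collapse(seg):
--     # collapse consecutive duplicate symbols
--     if not seg:
--         return ''
--     return seg[0] + ''.join(b for a, b in zip(seg, seg[1:]) if a != b)
--
--
-- def morse_like_encoding(indices, dash_threshold=4400, new_char_threshold=8900*2):
--     # Pass 1: a table of (symbol, flush) facts, one per consecutive gap,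
--     # with the two thresholds decided independently.
--     diffs = [b - a for a, b in zip(indices, indices[1:])]
--     symbols = ['-' if d <= dash_threshold else '.' for d in diffs]
--     flushes = [d > new_char_threshold for d in diffs]
--
--     # Pass 2: cut the symbol stream into segments; a flush gap closes the
--     # segment that ends with its own symbol.
--     segments = []
--     start = 0
--     for i, flush in enumerate(flushes):
--         if flush:
--             segments.append(symbols[start:i + 1])
--             start = i + 1
--     if start < len(symbols):
--         segments.append(symbols[start:])
--
--     return [_collapse(seg) for seg in segments]
-- ===== Notes on version B (the rewrite author's own statement) =====
-- stated objective: alternative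
-- what changed: A's single stateful loop (online last-symbol dedup interleaved with flush handling) is replaced by a table-first pipeline: one pass maps each gap to an independent (symbol, flush) pair, a second index-based pass cuts the symbol stream into slice segments at flush positions, and a helper collapses consecutive duplicates per segment via pairwise zip.
import Mathlib
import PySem

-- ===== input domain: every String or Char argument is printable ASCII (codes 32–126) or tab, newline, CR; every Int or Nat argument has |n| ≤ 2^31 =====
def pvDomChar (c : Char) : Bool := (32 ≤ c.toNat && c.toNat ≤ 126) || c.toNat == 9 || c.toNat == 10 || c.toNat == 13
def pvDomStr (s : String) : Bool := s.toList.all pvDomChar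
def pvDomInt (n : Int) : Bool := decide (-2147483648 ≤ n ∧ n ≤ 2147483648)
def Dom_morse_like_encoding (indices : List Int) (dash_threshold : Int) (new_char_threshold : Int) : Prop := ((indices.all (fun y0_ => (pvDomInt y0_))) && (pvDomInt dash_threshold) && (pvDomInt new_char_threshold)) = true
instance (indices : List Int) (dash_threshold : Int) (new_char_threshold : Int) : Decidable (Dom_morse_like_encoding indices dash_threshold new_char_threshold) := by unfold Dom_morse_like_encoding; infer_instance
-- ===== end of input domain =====

-- B re-decomposes A's single stateful loop into a table pass (symbol/flush per gap),
-- an index-based segment splitter, and a per-segment duplicate collapse; objective: alternative.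


-- ===== PORT A =====
-- Literal port of A: one fold over range(len-1); indices[i]/indices[i+1] are always
-- in range, so getD is exact; `current_char[-1]` on a non-empty list is getLast?;
-- the Python statement `i+=1` rebinds the loop variable and is dead, so it is omitted.
def morse_like_encoding (indices : List Int) (dash_threshold : Int) (new_char_threshold : Int) : List String :=
  let st := (List.range (indices.length - 1)).foldl
    (fun (st : List String × List Char) (i : Nat) =>
      let diff := indices.getD (i + 1) 0 - indices.getD i 0
      let cc :=
        if diff ≤ dash_threshold then
          if st.2.isEmpty || st.2.getLast? != some '-' then st.2 ++ ['-'] else st.2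
        else
          if st.2.isEmpty || st.2.getLast? != some '.' then st.2 ++ ['.'] else st.2
      if new_char_threshold < diff then (st.1 ++ [String.mk cc], []) else (st.1, cc))
    ([], [])
  if !st.2.isEmpty then st.1 ++ [String.mk st.2] else st.1

-- ===== PORT B =====
-- B-side helpers (ports of Source B's helpers)
def collapseP (seg : List Char) : String :=
  match seg with
  | [] => ""
  | s :: _ => String.mk (s :: ((seg.zip seg.tail).filter (fun p => p.1 != p.2)).map Prod.snd)

def morse_like_encoding_alt (indices : List Int) (dash_threshold : Int) (new_char_threshold : Int) : List String :=
  let diffs := List.zipWith (fun a b => b - a) indices indices.tail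
  let symbols := diffs.map (fun d => if d ≤ dash_threshold then '-' else '.')
  let flushes := diffs.map (fun d => decide (new_char_threshold < d))
  let st := (flushes.zipIdx).foldl
    (fun (st : List (List Char) × Nat) (p : Bool × Nat) =>
      if p.1 then (st.1 ++ [(symbols.drop st.2).take (p.2 + 1 - st.2)], p.2 + 1) else st)
    ([], 0)
  let segments := if st.2 < symbols.length then st.1 ++ [symbols.drop st.2] else st.1
  segments.map collapseP

-- ===== PRECONDITION & SPEC =====
def Spec_morse_like_encoding (indices : List Int) (dash_threshold : Int) (new_char_threshold : Int) (out : List String) : Prop := out = morse_like_encoding_alt indices dash_threshold new_char_threshold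
instance (indices : List Int) (dash_threshold : Int) (new_char_threshold : Int) (out : List String) : Decidable (Spec_morse_like_encoding indices dash_threshold new_char_threshold out) := by unfold Spec_morse_like_encoding; infer_instance

-- ===== CLAIM (what is proved, stated in full; the proofs are below) =====
def Claim_equal_morse_like_encoding : Prop := ∀ (indices : List Int) (dash_threshold : Int) (new_char_threshold : Int), Dom_morse_like_encoding indices dash_threshold new_char_threshold → Spec_morse_like_encoding indices dash_threshold new_char_threshold (morse_like_encoding indices dash_threshold new_char_threshold)

-- ===== LEMMAS AND PROOFS =====

-- run-collapse, keeping the first element of each run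
def colTail (prev : Char) : List Char → List Char
  | [] => []
  | x :: t => if x = prev then colTail x t else x :: colTail x t

def collapseL : List Char → List Char
  | [] => []
  | a :: t => a :: colTail a t

-- segment splitter: symbols, flush flags, pending segment
def goSeg : List Char → List Bool → List Char → List (List Char)
  | [], _, pend => if pend = [] then [] else [pend]
  | _ :: _, [], pend => if pend = [] then [] else [pend]
  | s :: ss, b :: bs, pend => if b then (pend ++ [s]) :: goSeg ss bs [] else goSeg ss bs (pend ++ [s])

theorem colTail_snoc (t : List Char) (prev s : Char) :
    colTail prev (t ++ [s]) =
      if t.getLastD prev = s then colTail prev t else colTail prev t ++ [s] := by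
  induction t generalizing prev with
  | nil => simp [colTail]; split_ifs with h1 h2 h2 <;> simp_all [colTail, eq_comm]
  | cons x t ih =>
    simp only [List.cons_append, colTail, List.getLastD_cons]
    split_ifs with hx <;> rw [ih] <;> split_ifs <;> simp [List.cons_append]

theorem colTail_getLastD (t : List Char) (prev : Char) :
    (colTail prev t).getLastD prev = t.getLastD prev := by
  induction t generalizing prev with
  | nil => rfl
  | cons x t ih =>
    simp only [colTail, List.getLastD_cons]
    split_ifs with hx
    · subst hx; exact ih x
    · rw [List.getLastD_cons]; exact ih x

theorem getLast?_cons_eq (a : Char) (t : List Char) :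
    (a :: t).getLast? = some (t.getLastD a) := by
  induction t generalizing a with
  | nil => rfl
  | cons x t ih => simp [List.getLast?_cons, ih, List.getLastD_cons]

theorem collapseL_getLast? (t : List Char) :
    (collapseL t).getLast? = t.getLast? := by
  cases t with
  | nil => rfl
  | cons a t =>
    simp only [collapseL]
    rw [getLast?_cons_eq, getLast?_cons_eq, colTail_getLastD]

theorem collapseL_eq_nil_iff (t : List Char) : collapseL t = [] ↔ t = [] := by
  cases t <;> simp [collapseL]

theorem collapseL_snoc (t : List Char) (s : Char) :
    collapseL (t ++ [s]) =
      if t.getLast? = some s then collapseL t else collapseL t ++ [s] := by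
  cases t with
  | nil => simp [collapseL, colTail]
  | cons a t =>
    simp only [List.cons_append, collapseL, colTail_snoc, getLast?_cons_eq]
    split_ifs with h1 h2 h2 <;> simp_all

-- A's per-symbol dedup step is the online form of collapseL
theorem dedup_snoc (pend : List Char) (s : Char) :
    (if (collapseL pend).isEmpty || (collapseL pend).getLast? != some s
       then collapseL pend ++ [s] else collapseL pend) = collapseL (pend ++ [s]) := by
  rw [collapseL_snoc]
  by_cases hnil : pend = []
  · subst hnil; simp [collapseL]
  · have h2 : (collapseL pend).isEmpty = false := by
      simp [List.isEmpty_eq_false_iff, collapseL_eq_nil_iff, hnil]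
    rw [h2]
    by_cases hl : pend.getLast? = some s
    · simp [collapseL_getLast?, hl]
    · simp [collapseL_getLast?, hl]

-- the port of Source B's _collapse computes collapseL
theorem zip_filter_colTail (t : List Char) (a : Char) :
    (((a :: t).zip t).filter (fun p => p.1 != p.2)).map Prod.snd = colTail a t := by
  induction t generalizing a with
  | nil => rfl
  | cons x t ih =>
    simp only [List.zip_cons_cons, List.filter_cons, colTail]
    by_cases hx : x = a
    · simp [hx, ih a]
    · have hb : (a != x) = true := by simpa [bne_iff_ne] using Ne.symm hx
      simp [hb, hx, ih x]

theorem collapseP_eq (seg : List Char) : collapseP seg = String.mk (collapseL seg) := by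
  cases seg with
  | nil => rfl
  | cons a t => simp [collapseP, collapseL, zip_filter_colTail]

-- ===== A side =====

def stepA (dash nc : Int) (st : List String × List Char) (d : Int) : List String × List Char :=
  let cc :=
    if d ≤ dash then
      if st.2.isEmpty || st.2.getLast? != some '-' then st.2 ++ ['-'] else st.2
    else
      if st.2.isEmpty || st.2.getLast? != some '.' then st.2 ++ ['.'] else st.2
  if nc < d then (st.1 ++ [String.mk cc], []) else (st.1, cc)

def finishA (st : List String × List Char) : List String :=
  if !st.2.isEmpty then st.1 ++ [String.mk st.2] else st.1

theorem foldl_range_getD {α β : Type} (l : List β) (d : β) (f : α → β → α) (init : α) :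
    (List.range l.length).foldl (fun st i => f st (l.getD i d)) init = l.foldl f init := by
  induction l using List.reverseRecOn generalizing init with
  | nil => rfl
  | append_singleton l x ih =>
    have hcongr : ∀ (init' : α),
        (List.range l.length).foldl (fun st i => f st ((l ++ [x]).getD i d)) init'
          = (List.range l.length).foldl (fun st i => f st (l.getD i d)) init' := by
      intro init'
      apply PySem.List.foldl_congr_mem
      intro st i hi
      have : i < l.length := List.mem_range.mp hi
      simp [List.getD, List.getElem?_append_left this]
    simp only [List.length_append, List.length_cons, List.length_nil, List.range_succ,
      List.foldl_append, List.foldl_cons, List.foldl_nil, hcongr, ih]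
    congr 1
    simp [List.getD]

theorem mainA (dash nc : Int) (ds : List Int) (mc : List String) (pend : List Char) :
    finishA (ds.foldl (stepA dash nc) (mc, collapseL pend)) =
      mc ++ (goSeg (ds.map (fun d => if d ≤ dash then '-' else '.'))
                   (ds.map (fun d => decide (nc < d))) pend).map
              (fun seg => String.mk (collapseL seg)) := by
  induction ds generalizing mc pend with
  | nil =>
    simp only [List.foldl_nil, List.map_nil, goSeg, finishA]
    by_cases h : pend = []
    · simp [h, collapseL_eq_nil_iff]
    · simp [h, (collapseL_eq_nil_iff pend).not.mpr h,
        List.isEmpty_eq_false_iff.mpr ((collapseL_eq_nil_iff pend).not.mpr h)]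
  | cons d ds ih =>
    have hstep : stepA dash nc (mc, collapseL pend) d =
        if nc < d then (mc ++ [String.mk (collapseL (pend ++ [if d ≤ dash then '-' else '.']))], [])
        else (mc, collapseL (pend ++ [if d ≤ dash then '-' else '.'])) := by
      unfold stepA
      by_cases hd : d ≤ dash <;> simp only [hd, if_true, if_false, if_pos, if_neg, ite_true, ite_false] <;>
        rw [dedup_snoc] <;> simp [hd]
    simp only [List.foldl_cons, hstep, List.map_cons, goSeg]
    by_cases hb : nc < d
    · simp only [hb, if_true, decide_eq_true_eq, decide_true]
      have hthis := ih (mc ++ [String.mk (collapseL (pend ++ [if d ≤ dash then '-' else '.']))]) []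
      rw [show collapseL [] = ([] : List Char) from rfl] at hthis
      rw [hthis]
      simp
    · simp only [hb, if_false, decide_false]
      rw [ih mc (pend ++ [if d ≤ dash then '-' else '.'])]
      simp [hb]

-- ===== B side =====

def stepB (syms : List Char) (st : List (List Char) × Nat) (p : Bool × Nat) : List (List Char) × Nat :=
  if p.1 then (st.1 ++ [(syms.drop st.2).take (p.2 + 1 - st.2)], p.2 + 1) else st

def finishB (syms : List Char) (st : List (List Char) × Nat) : List (List Char) :=
  if st.2 < syms.length then st.1 ++ [syms.drop st.2] else st.1

theorem mainB (syms : List Char) (bs : List Bool) (k start : Nat) (segs : List (List Char))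
    (hsk : start ≤ k) (hlen : syms.length = k + bs.length) :
    finishB syms ((bs.zipIdx k).foldl (stepB syms) (segs, start)) =
      segs ++ goSeg (syms.drop k) bs ((syms.drop start).take (k - start)) := by
  induction bs generalizing k start segs with
  | nil =>
    simp only [List.zipIdx_nil, List.foldl_nil, finishB]
    have hk : syms.length = k := by simpa using hlen
    have hdropk : syms.drop k = [] := by simp [List.drop_eq_nil_iff, hk.le]
    have htake : (syms.drop start).take (k - start) = syms.drop start := by
      apply List.take_of_length_le
      simp [hk]
    rw [hdropk, htake]
    by_cases h : start < syms.length
    · have : syms.drop start ≠ [] := by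
        simp [List.drop_eq_nil_iff]; omega
      simp [goSeg, h, this]
    · have : syms.drop start = [] := by
        simp [List.drop_eq_nil_iff]; omega
      simp [goSeg, h, this]
  | cons b bs ih =>
    have hlen' : syms.length = (k + 1) + bs.length := by rw [hlen, List.length_cons]; omega
    have hk : k < syms.length := by omega
    have hdropk : syms.drop k = syms[k] :: syms.drop (k + 1) :=
      List.drop_eq_getElem_cons hk
    have hpend : (syms.drop start).take (k + 1 - start) =
        (syms.drop start).take (k - start) ++ [syms[k]] := by
      have h1 : k + 1 - start = (k - start) + 1 := by omega
      rw [h1, List.take_succ]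
      have : (syms.drop start)[k - start]? = some syms[k] := by
        rw [List.getElem?_drop]
        have : start + (k - start) = k := by omega
        rw [this, List.getElem?_eq_getElem hk]
      simp [this]
    simp only [List.zipIdx_cons, List.foldl_cons]
    cases b with
    | true =>
      simp only [stepB, if_true]
      rw [ih (k + 1) (k + 1) _ (le_refl _) hlen']
      rw [hdropk]
      simp only [goSeg, if_true, Nat.sub_self, List.take_zero]
      rw [hpend]
      simp
    | false =>
      simp only [stepB, Bool.false_eq_true, if_false]
      rw [ih (k + 1) start _ (by omega) hlen']
      rw [hdropk]
      simp only [goSeg, if_false]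
      rw [hpend]
      simp

def diffsOf (indices : List Int) : List Int := List.zipWith (fun a b => b - a) indices indices.tail
def symsOf (indices : List Int) (dash : Int) : List Char :=
  (diffsOf indices).map (fun d => if d ≤ dash then '-' else '.')
def flagsOf (indices : List Int) (nc : Int) : List Bool :=
  (diffsOf indices).map (fun d => decide (nc < d))

theorem portA_eq (indices : List Int) (dash nc : Int) :
    morse_like_encoding indices dash nc =
      finishA ((List.range (indices.length - 1)).foldl
        (fun st i => stepA dash nc st (indices.getD (i + 1) 0 - indices.getD i 0)) ([], [])) := rfl

theorem portB_eq (indices : List Int) (dash nc : Int) :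
    morse_like_encoding_alt indices dash nc =
      (finishB (symsOf indices dash)
        (((flagsOf indices nc).zipIdx).foldl (stepB (symsOf indices dash)) ([], 0))).map collapseP := rfl

-- ===== VERDICT (by name: the statement is the Claim_ definition above) =====
theorem morse_like_encoding_spec : Claim_equal_morse_like_encoding := by
  intro indices dash nc _
  unfold Spec_morse_like_encoding
  rw [portA_eq, portB_eq]
  have hdlen : (diffsOf indices).length = indices.length - 1 := by
    simp [diffsOf, List.length_zipWith, List.length_tail]
  have hA : (List.range (indices.length - 1)).foldl
      (fun st i => stepA dash nc st (indices.getD (i + 1) 0 - indices.getD i 0)) ([], []) =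
      (diffsOf indices).foldl (stepA dash nc) ([], []) := by
    rw [← hdlen, ← foldl_range_getD (diffsOf indices) 0 (stepA dash nc) ([], [])]
    apply PySem.List.foldl_congr_mem
    intro st i hi
    have hilt : i < (diffsOf indices).length := List.mem_range.mp hi
    have h1 : i < indices.length := by omega
    have h2 : i + 1 < indices.length := by omega
    have h3 : i < indices.tail.length := by simp [List.length_tail]; omega
    have hd : (diffsOf indices).getD i 0 = indices.getD (i + 1) 0 - indices.getD i 0 := by
      simp [List.getD, diffsOf, List.getElem?_zipWith, List.getElem?_eq_getElem, h1, h2, h3,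
        List.getElem_tail]
    rw [hd]
  rw [hA]
  have h1 := mainA dash nc (diffsOf indices) [] []
  rw [show collapseL [] = ([] : List Char) from rfl] at h1
  rw [h1]
  have h2 := mainB (symsOf indices dash) (flagsOf indices nc) 0 0 [] (le_refl 0)
    (by simp [symsOf, flagsOf])
  simp only [List.drop_zero, Nat.sub_self, List.take_zero, List.nil_append] at h2
  rw [h2]
  rw [show collapseP = (fun seg => String.mk (collapseL seg)) from funext collapseP_eq]
  simp [symsOf, flagsOf]
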